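-- pv_equiv track=rewrite | github.com/rejunity/tiny-asic-4bit-matrix-mul | test/utils.py | pack_weights
-- ===== SOURCE A (Python) =====
-- def pack_weights(weights, weights_per_byte=-1):
--     if weights_per_byte == -1:
--         weights_per_byte = len(weights)
--     packed = 0
--     if weights_per_byte == 5:
--         for i in weights:
--             if i == 0: w =   00
--             if i > 0:  w = 0b01
--             if i < 0:  w = 0b10
--             packed = (packed * 3) + w
--     elif weights_per_byte == 4:
--         for i in weights:
--             w = 0b11 if i  < 0 else 1
--             w =    0 if i == 0 else w
--             packed = (packed << 2) | w
--     elif weights_per_byte == 2: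
--         for w in weights:
--             packed = (packed << 4) | (w & 0b1111)
--     else:
--         assert "Unknown weights_per_byte" == weights_per_byte
--     return packed
-- ===== SOURCE B (Python) =====
-- def pack_weights(weights, weights_per_byte=-1):
--     n = len(weights)
--     if weights_per_byte == -1:
--         weights_per_byte = n
--     if weights_per_byte == 5:
--         base = 3
--         def digit(w):
--             return 0 if w == 0 else (1 if w > 0 else 2)
--     elif weights_per_byte == 4:
--         base = 4
--         def digit(w):
--             return 0 if w == 0 else (3 if w < 0 else 1)
--     elif weights_per_byte == 2:
--         base = 16
--         def digit(w):
--             return w % 16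
--     else:
--         assert "Unknown weights_per_byte" == weights_per_byte
--     return sum(digit(w) * base ** (n - 1 - k) for k, w in enumerate(weights))
-- ===== Notes on version B (the rewrite author's own statement) =====
-- stated objective: alternative
-- what changed: Replaced the three Horner-style accumulator loops (multiply/shift-or the running value, with per-mode inline branching and bit masking) by a single positional sum: pick a digit map and base per mode, then return sum(digit(w) * base**(n-1-k)) over enumerate(weights); mode 2's 'w & 0b1111' becomes 'w % 16'.
import Mathlib
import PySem

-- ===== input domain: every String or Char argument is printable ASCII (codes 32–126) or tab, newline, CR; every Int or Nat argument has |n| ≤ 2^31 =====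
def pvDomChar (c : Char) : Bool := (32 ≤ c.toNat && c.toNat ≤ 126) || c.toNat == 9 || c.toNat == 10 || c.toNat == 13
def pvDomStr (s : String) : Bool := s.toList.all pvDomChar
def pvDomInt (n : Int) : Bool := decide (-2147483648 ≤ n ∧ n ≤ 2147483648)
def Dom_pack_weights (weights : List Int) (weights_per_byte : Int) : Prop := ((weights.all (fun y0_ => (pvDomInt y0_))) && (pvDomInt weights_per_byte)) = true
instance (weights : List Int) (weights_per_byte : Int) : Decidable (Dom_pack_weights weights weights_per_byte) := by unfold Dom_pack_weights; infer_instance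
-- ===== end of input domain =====

-- B replaces A's Horner accumulator loops by a direct positional sum (digit map + base per mode); alternative decomposition, same cost.

-- ===== PORT A =====
-- Transliteration of A. In mode 5 the three successive 'if's assign exactly one value
-- (trichotomy), written as a chained if. '<<' and '|' are Lean's '<<<' and PySem.Int.bor,
-- '& 0b1111' is PySem.Int.band _ 15 (Python-exact on negatives).
def pack_weights (weights : List Int) (weights_per_byte : Int) : Int :=
  let wpb : Int := if weights_per_byte = -1 then (weights.length : Int) else weights_per_byte
  if wpb = 5 then
    weights.foldl (fun packed i =>
      packed * 3 + (if i = 0 then 0 else if i > 0 then 1 else 2)) 0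
  else if wpb = 4 then
    weights.foldl (fun packed i =>
      let w : Int := if i < 0 then 3 else 1
      let w : Int := if i = 0 then 0 else w
      PySem.Int.bor (packed <<< (2:Nat)) w) 0
  else if wpb = 2 then
    weights.foldl (fun packed w =>
      PySem.Int.bor (packed <<< (4:Nat)) (PySem.Int.band w 15)) 0
  else 0  -- Python raises AssertionError here; excluded by Pre_

-- ===== PORT B =====
-- Transliteration of Source B: per-mode digit map and base, then the positional sum
-- over enumerate(weights); 'base ** (n-1-k)' has a nonnegative exponent for every
-- enumerated index k, ported as ^ ((n - 1 - k).toNat).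
def pack_weights_alt (weights : List Int) (weights_per_byte : Int) : Int :=
  let n := weights.length
  let wpb : Int := if weights_per_byte = -1 then (n : Int) else weights_per_byte
  let digit : Int → Int :=
    if wpb = 5 then fun w => if w = 0 then 0 else if w > 0 then 1 else 2
    else if wpb = 4 then fun w => if w = 0 then 0 else if w < 0 then 3 else 1
    else fun w => PySem.Int.mod w 16
  let base : Int := if wpb = 5 then 3 else if wpb = 4 then 4 else 16
  ((PySem.List.enumerate weights).map
    (fun kw => digit kw.2 * base ^ (((n : Int) - 1 - kw.1).toNat))).sum

-- ===== PRECONDITION & SPEC =====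
-- Pre_ excludes exactly the inputs on which A's else-branch assert raises AssertionError
-- (weights_per_byte not in {5,4,2}, after -1 is replaced by len(weights)).
def Pre_pack_weights (weights : List Int) (weights_per_byte : Int) : Prop :=
  weights_per_byte = 5 ∨ weights_per_byte = 4 ∨ weights_per_byte = 2 ∨
    (weights_per_byte = -1 ∧ (weights.length = 5 ∨ weights.length = 4 ∨ weights.length = 2))
instance (weights : List Int) (weights_per_byte : Int) : Decidable (Pre_pack_weights weights weights_per_byte) := by unfold Pre_pack_weights; infer_instance
def pvWitness_pack_weights : List Int × Int := ([1, -1, 0, 7, -3], 5)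

def Spec_pack_weights (weights : List Int) (weights_per_byte : Int) (out : Int) : Prop := out = pack_weights_alt weights weights_per_byte
instance (weights : List Int) (weights_per_byte : Int) (out : Int) : Decidable (Spec_pack_weights weights weights_per_byte out) := by unfold Spec_pack_weights; infer_instance

-- ===== CLAIM (what is proved, stated in full; the proofs are below) =====
def Claim_equal_pack_weights : Prop := ∀ (weights : List Int) (weights_per_byte : Int), Dom_pack_weights weights weights_per_byte → Pre_pack_weights weights weights_per_byte → Spec_pack_weights weights weights_per_byte (pack_weights weights weights_per_byte)

-- ===== LEMMAS AND PROOFS =====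

-- The value of a digit string, most significant first (right-recursive view of Horner).
def pvPolyval (d : Int → Int) (b : Int) : List Int → Int
  | [] => 0
  | x :: xs => d x * b ^ xs.length + pvPolyval d b xs

theorem pv_horner_foldl (d : Int → Int) (b : Int) (l : List Int) (a : Int) :
    l.foldl (fun p i => p * b + d i) a = a * b ^ l.length + pvPolyval d b l := by
  induction l generalizing a with
  | nil => simp [pvPolyval]
  | cons x xs ih =>
    simp only [List.foldl_cons, ih, pvPolyval, List.length_cons]
    ring

theorem pv_enumsum (d : Int → Int) (b : Int) (l : List Int) (s : Int) :
    ((PySem.List.enumerate l s).map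
      (fun kw => d kw.2 * b ^ ((s + l.length - 1 - kw.1).toNat))).sum = pvPolyval d b l := by
  induction l generalizing s with
  | nil => simp [PySem.List.enumerate, pvPolyval]
  | cons x xs ih =>
    rw [PySem.List.enumerate_cons]
    simp only [List.map_cons, List.sum_cons, pvPolyval, List.length_cons]
    have h1 : (s + ((xs.length : Int) + 1) - 1 - s).toNat = xs.length := by omega
    have h2 : (fun kw : Int × Int => d kw.2 * b ^ ((s + ((xs.length : Int) + 1) - 1 - kw.1).toNat))
        = (fun kw : Int × Int => d kw.2 * b ^ (((s + 1) + (xs.length : Int) - 1 - kw.1).toNat)) := by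
      funext kw
      have : s + ((xs.length : Int) + 1) - 1 - kw.1 = (s + 1) + (xs.length : Int) - 1 - kw.1 := by ring
      rw [this]
    push_cast
    push_cast at h1 h2 ih
    rw [h1, h2, ih (s + 1)]

theorem pv_bor_shift (p w : Int) (k : Nat) (hp : 0 ≤ p) (hw : 0 ≤ w) (hlt : w < 2 ^ k) :
    PySem.Int.bor (p <<< k) w = p * 2 ^ k + w := by
  obtain ⟨pn, rfl⟩ := Int.eq_ofNat_of_zero_le hp
  obtain ⟨wn, rfl⟩ := Int.eq_ofNat_of_zero_le hw
  have hsh : ((pn : Int) <<< k) = ((pn <<< k : Nat) : Int) := by exact_mod_cast rfl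
  have hlt' : wn < 2 ^ k := by exact_mod_cast hlt
  rw [hsh, PySem.Int.bor_natCast, ← Nat.shiftLeft_add_eq_or_of_lt hlt' pn]
  push_cast [Nat.shiftLeft_eq]
  ring

theorem pv_band15 (a : Int) : PySem.Int.band a 15 = PySem.Int.mod a 16 := by
  have hnat : ∀ n : Nat, n &&& 15 = n % 16 := by
    intro n
    have := Nat.and_two_pow_sub_one_eq_mod n 4
    norm_num at this; omega
  by_cases h : 0 ≤ a
  · obtain ⟨n, rfl⟩ := Int.eq_ofNat_of_zero_le h
    have : PySem.Int.band (n : Int) 15 = ((n &&& 15 : Nat) : Int) := by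
      exact_mod_cast PySem.Int.band_natCast n 15
    rw [this, hnat n, PySem.Int.mod]
    rw [Int.fmod_eq_emod_of_nonneg _ (by norm_num)]
    omega
  · simp only [PySem.Int.band, h, if_false, show (0:Int) ≤ 15 by norm_num, if_true]
    rw [PySem.Int.mod, Int.fmod_eq_emod_of_nonneg _ (by norm_num)]
    have hc : (15:Int).toNat &&& (-a - 1).toNat = (-a - 1).toNat % 16 := by
      rw [show ((15:Int)).toNat = 15 from rfl, Nat.and_comm]
      exact hnat _
    omega

theorem pv_band15_bounds (a : Int) : 0 ≤ PySem.Int.band a 15 ∧ PySem.Int.band a 15 < 16 := by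
  rw [pv_band15]
  exact ⟨PySem.Int.mod_nonneg a (by norm_num), PySem.Int.mod_lt a (by norm_num)⟩

-- Accumulator of the bit-packing loops stays nonnegative, so shift-or is multiply-add.
theorem pv_fold_shift (k : Nat) (d : Int → Int) (hd : ∀ i, 0 ≤ d i ∧ d i < 2 ^ k)
    (l : List Int) (a : Int) (ha : 0 ≤ a) :
    l.foldl (fun p i => PySem.Int.bor (p <<< k) (d i)) a
      = l.foldl (fun p i => p * 2 ^ k + d i) a := by
  induction l generalizing a with
  | nil => rfl
  | cons x xs ih =>
    simp only [List.foldl_cons]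
    rw [pv_bor_shift a (d x) k ha (hd x).1 (hd x).2]
    exact ih _ (by nlinarith [(hd x).1, pow_pos (show (0:Int) < 2 by norm_num) k])

theorem pv_main (d : Int → Int) (b : Int) (l : List Int) :
    l.foldl (fun p i => p * b + d i) 0
      = ((PySem.List.enumerate l).map
          (fun kw => d kw.2 * b ^ (((l.length : Int) - 1 - kw.1).toNat))).sum := by
  rw [pv_horner_foldl d b l 0, zero_mul, zero_add, ← pv_enumsum d b l 0]
  refine congrArg List.sum (List.map_congr_left fun kw _ => ?_)
  norm_num

theorem pv_mode5 (l : List Int) :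
    l.foldl (fun packed i => packed * 3 + (if i = 0 then 0 else if i > 0 then 1 else 2)) 0
      = ((PySem.List.enumerate l).map
          (fun kw => (if kw.2 = 0 then (0:Int) else if kw.2 > 0 then 1 else 2)
            * 3 ^ (((l.length : Int) - 1 - kw.1).toNat))).sum :=
  pv_main (fun i => if i = 0 then 0 else if i > 0 then 1 else 2) 3 l

theorem pv_mode4 (l : List Int) :
    l.foldl (fun packed i =>
        let w : Int := if i < 0 then 3 else 1
        let w : Int := if i = 0 then 0 else w
        PySem.Int.bor (packed <<< (2:Nat)) w) 0
      = ((PySem.List.enumerate l).map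
          (fun kw => (if kw.2 = 0 then (0:Int) else if kw.2 < 0 then 3 else 1)
            * 4 ^ (((l.length : Int) - 1 - kw.1).toNat))).sum := by
  have h := pv_fold_shift 2 (fun i => if i = 0 then (0:Int) else if i < 0 then 3 else 1)
    (by intro i; refine ⟨?_, ?_⟩ <;> simp only [] <;> split_ifs <;> norm_num) l 0 le_rfl
  norm_num at h
  refine h.trans ?_
  exact pv_main (fun i => if i = 0 then 0 else if i < 0 then 3 else 1) 4 l

theorem pv_mode2 (l : List Int) :
    l.foldl (fun packed w => PySem.Int.bor (packed <<< (4:Nat)) (PySem.Int.band w 15)) 0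
      = ((PySem.List.enumerate l).map
          (fun kw => PySem.Int.mod kw.2 16 * 16 ^ (((l.length : Int) - 1 - kw.1).toNat))).sum := by
  have h := pv_fold_shift 4 (fun w => PySem.Int.band w 15)
    (fun i => pv_band15_bounds i) l 0 le_rfl
  norm_num at h
  refine h.trans ?_
  simp only [pv_band15]
  exact pv_main (fun w => PySem.Int.mod w 16) 16 l

-- ===== VERDICT (by name: the statement is the Claim_ definition above) =====
theorem pack_weights_spec : Claim_equal_pack_weights := by
  intro weights wpb _ hpre
  unfold Spec_pack_weights pack_weights pack_weights_alt
  simp only []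
  set e := if wpb = -1 then (weights.length : Int) else wpb with hedef
  have he : e = 5 ∨ e = 4 ∨ e = 2 := by
    rcases hpre with h | h | h | ⟨hm, hl⟩
    · left; simp [hedef, h]
    · right; left; simp [hedef, h]
    · right; right; simp [hedef, h]
    · rcases hl with h | h | h <;> simp [hedef, hm, h]
  rcases he with h | h | h
  · rw [h, if_pos rfl, if_pos rfl, if_pos rfl]
    exact pv_mode5 weights
  · rw [h, if_neg (by norm_num), if_pos rfl, if_neg (by norm_num), if_pos rfl,
      if_neg (by norm_num), if_pos rfl]
    exact pv_mode4 weights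
  · rw [h, if_neg (by norm_num), if_neg (by norm_num), if_pos rfl,
      if_neg (by norm_num), if_neg (by norm_num), if_neg (by norm_num), if_neg (by norm_num)]
    exact pv_mode2 weights
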